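-- pv_equiv track=rewrite | github.com/ananthchellappa/python | circuits/rpt_inst_path.py | find_matches_under_top
-- ===== SOURCE A (Python) =====
-- def find_matches_under_top(children_by_parent, top_cell, target_cell):
--     """
--     Top-down from explicit top cell.
--
--     Returns list of tuples:
--       (root_cell_name, [inst1, inst2, ...])
--     """
--     results = []
--
--     def dfs(current_cell, inst_path, active_cells):
--         if current_cell in active_cells:
--             return
--
--         active_cells.add(current_cell)
--
--         for edge in children_by_parent.get(current_cell, []):
--             child_cell = edge["child_cell"]
--             inst_name = edge["inst_name"]
--             new_inst_path = inst_path + [inst_name]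
--
--             if child_cell == target_cell:
--                 results.append((top_cell, new_inst_path))
--
--             dfs(child_cell, new_inst_path, active_cells)
--
--         active_cells.remove(current_cell)
--
--     dfs(top_cell, [], set())
--     return results
-- ===== SOURCE B (Python) =====
-- def find_matches_under_top(children_by_parent, top_cell, target_cell):
--     """Iterative DFS with an explicit stack of frames (cell, path, remaining
--     edges); active cells are added when a frame is pushed and removed when it
--     is popped, so no recursion and no inner function are needed."""
--     results = []
--     active = {top_cell}
--     stack = [[top_cell, [], children_by_parent.get(top_cell, [])]]
--     while stack:
--         cell, path, remaining = stack[-1]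
--         if not remaining:
--             stack.pop()
--             active.remove(cell)
--             continue
--         edge = remaining[0]
--         stack[-1][2] = remaining[1:]
--         child = edge["child_cell"]
--         new_path = path + [edge["inst_name"]]
--         if child == target_cell:
--             results.append((top_cell, new_path))
--         if child not in active:
--             active.add(child)
--             stack.append([child, new_path, children_by_parent.get(child, [])])
--     return results
-- ===== Notes on version B (the rewrite author's own statement) =====
-- stated objective: alternative
-- what changed: Replaces the recursive inner dfs with a fully iterative DFS: a while-loop over an explicit stack of frames (cell, path, remaining edges), adding a cell to the active set when its frame is pushed and removing it when the frame is popped.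
import Mathlib
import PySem

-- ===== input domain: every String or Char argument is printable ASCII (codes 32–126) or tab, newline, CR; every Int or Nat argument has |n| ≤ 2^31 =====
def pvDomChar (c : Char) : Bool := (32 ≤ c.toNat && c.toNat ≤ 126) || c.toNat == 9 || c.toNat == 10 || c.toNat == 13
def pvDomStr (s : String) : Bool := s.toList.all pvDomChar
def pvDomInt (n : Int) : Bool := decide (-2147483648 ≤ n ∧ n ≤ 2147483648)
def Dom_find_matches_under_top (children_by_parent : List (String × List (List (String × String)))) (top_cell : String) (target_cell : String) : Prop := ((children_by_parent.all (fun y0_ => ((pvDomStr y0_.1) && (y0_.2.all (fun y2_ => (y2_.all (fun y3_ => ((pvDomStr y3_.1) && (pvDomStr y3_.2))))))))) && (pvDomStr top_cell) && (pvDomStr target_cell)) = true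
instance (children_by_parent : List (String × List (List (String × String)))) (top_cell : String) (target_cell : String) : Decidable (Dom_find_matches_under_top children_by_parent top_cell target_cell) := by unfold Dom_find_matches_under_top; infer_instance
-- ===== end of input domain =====

-- B replaces A's recursive inner dfs (shared results list, add/remove on a shared active set,
-- implicit call stack) by a fully iterative DFS: a while-loop over an explicit stack of frames
-- (cell, path, remaining edges); same cost ("alternative").
-- A's recursion is total in Python; its port carries a fuel argument (length + 2, a sufficient
-- depth bound), B's while-loop a step-count fuel ((E+2)^(length+2), a proven-sufficient bound on
-- the number of loop iterations); both fuel-out branches are unreachable on real runs.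

-- ===== PORT A =====
-- dfs(current_cell, inst_path, active_cells): the mutable 'results' is threaded as an accumulator;
-- 'active_cells' is added to on entry and removed on exit, so each call returns it unchanged and it
-- is passed by value.  edge["child_cell"] / edge["inst_name"] are ported with getD "" — exact inside
-- Pre_find_matches_under_top, which guarantees the keys are present on every edge A reads.
def dfsA (children_by_parent : List (String × List (List (String × String)))) (top_cell target_cell : String) :
    Nat → String → List String → PySem.Set String → List (String × List String) → List (String × List String)
  | 0, _, _, _, results => results
  | fuel+1, current_cell, inst_path, active_cells, results =>
    if PySem.Set.contains active_cells current_cell then results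
    else
      let active_cells := PySem.Set.add active_cells current_cell
      (PySem.Dict.getD ⟨children_by_parent⟩ current_cell []).foldl
        (fun results edge =>
          let child_cell := PySem.Dict.getD ⟨edge⟩ "child_cell" ""
          let inst_name := PySem.Dict.getD ⟨edge⟩ "inst_name" ""
          let new_inst_path := inst_path ++ [inst_name]
          let results := if child_cell == target_cell then results ++ [(top_cell, new_inst_path)] else results
          dfsA children_by_parent top_cell target_cell fuel child_cell new_inst_path active_cells results)
        results

def find_matches_under_top (children_by_parent : List (String × List (List (String × String)))) (top_cell : String) (target_cell : String) : List (String × List String) :=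
  dfsA children_by_parent top_cell target_cell (children_by_parent.length + 2) top_cell [] PySem.Set.empty []

-- ===== PORT B =====
-- The while-loop of Source B: one step per iteration; the frame list is the stack (head = top of
-- stack), frames are (cell, path, remaining_edges).  'active.remove(cell)' is ported with
-- Set.discard: the removed cell is always present (it was added when its frame was pushed), so
-- discard is exact there.
def runB (children_by_parent : List (String × List (List (String × String)))) (top_cell target_cell : String) :
    Nat → List (String × List String × List (List (String × String))) → PySem.Set String →
    List (String × List String) → List (String × List String)
  | 0, _, _, results => results
  | _+1, [], _, results => results
  | fuel+1, (cell, _, []) :: rest, active, results =>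
      runB children_by_parent top_cell target_cell fuel rest (PySem.Set.discard active cell) results
  | fuel+1, (cell, path, edge :: remaining) :: rest, active, results =>
      let child := PySem.Dict.getD ⟨edge⟩ "child_cell" ""
      let new_path := path ++ [PySem.Dict.getD ⟨edge⟩ "inst_name" ""]
      let results := if child == target_cell then results ++ [(top_cell, new_path)] else results
      if PySem.Set.contains active child then
        runB children_by_parent top_cell target_cell fuel ((cell, path, remaining) :: rest) active results
      else
        runB children_by_parent top_cell target_cell fuel
          ((child, new_path, PySem.Dict.getD ⟨children_by_parent⟩ child []) :: (cell, path, remaining) :: rest)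
          (PySem.Set.add active child) results

def find_matches_under_top_alt (children_by_parent : List (String × List (List (String × String)))) (top_cell : String) (target_cell : String) : List (String × List String) :=
  let E := (children_by_parent.map (fun p => p.2.length)).sum
  runB children_by_parent top_cell target_cell ((E + 2) ^ (children_by_parent.length + 2))
    [(top_cell, [], PySem.Dict.getD ⟨children_by_parent⟩ top_cell [])]
    (PySem.Set.add PySem.Set.empty top_cell) []

-- ===== PRECONDITION & SPEC =====
-- A raises KeyError when it reads an edge dict lacking "child_cell" or "inst_name"; only edges
-- reachable from top_cell are read, but reachability is not closed-form, so Pre_ conservatively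
-- requires all edges well-formed whenever top_cell is a key at all (if it is not, A reads no edge);
-- this excludes some inputs where a malformed edge is unreachable and A still returns (see cites).
def Pre_find_matches_under_top (children_by_parent : List (String × List (List (String × String)))) (top_cell : String) (target_cell : String) : Prop :=
  PySem.Dict.contains ⟨children_by_parent⟩ top_cell = true →
    ∀ p ∈ children_by_parent, ∀ e ∈ p.2,
      "child_cell" ∈ e.map Prod.fst ∧ "inst_name" ∈ e.map Prod.fst
instance (children_by_parent : List (String × List (List (String × String)))) (top_cell : String) (target_cell : String) : Decidable (Pre_find_matches_under_top children_by_parent top_cell target_cell) := by unfold Pre_find_matches_under_top; infer_instance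

def pvWitness_find_matches_under_top : (List (String × List (List (String × String)))) × String × String :=
  ([("t", [[("child_cell", "x"), ("inst_name", "i1")], [("child_cell", "t"), ("inst_name", "i2")]]), ("x", [])], "t", "x")

def Spec_find_matches_under_top (children_by_parent : List (String × List (List (String × String)))) (top_cell : String) (target_cell : String) (out : List (String × List String)) : Prop := out = find_matches_under_top_alt children_by_parent top_cell target_cell
instance (children_by_parent : List (String × List (List (String × String)))) (top_cell : String) (target_cell : String) (out : List (String × List String)) : Decidable (Spec_find_matches_under_top children_by_parent top_cell target_cell out) := by unfold Spec_find_matches_under_top; infer_instance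

-- ===== CLAIM (what is proved, stated in full; the proofs are below) =====
def Claim_equal_find_matches_under_top : Prop := ∀ (children_by_parent : List (String × List (List (String × String)))) (top_cell : String) (target_cell : String), Dom_find_matches_under_top children_by_parent top_cell target_cell → Pre_find_matches_under_top children_by_parent top_cell target_cell → Spec_find_matches_under_top children_by_parent top_cell target_cell (find_matches_under_top children_by_parent top_cell target_cell)

-- ===== LEMMAS AND PROOFS =====

-- Pure denotational DFS: the common meaning both ports are reduced to.
def walkB (children_by_parent : List (String × List (List (String × String)))) (top_cell target_cell : String) :
    Nat → String → List String → List String → List (String × List String)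
  | 0, _, _, _ => []
  | fuel+1, cell, inst_path, ancestors =>
    if ancestors.contains cell then []
    else
      (PySem.Dict.getD ⟨children_by_parent⟩ cell []).flatMap
        (fun edge =>
          let path := inst_path ++ [PySem.Dict.getD ⟨edge⟩ "inst_name" ""]
          (if PySem.Dict.getD ⟨edge⟩ "child_cell" "" == target_cell then [(top_cell, path)] else []) ++
            walkB children_by_parent top_cell target_cell fuel (PySem.Dict.getD ⟨edge⟩ "child_cell" "") path (ancestors ++ [cell]))

-- A's accumulator-threaded dfs equals 'prefix ++ walkB' whenever the active set and the
-- ancestor chain have the same members.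
lemma dfsA_eq_walkB (children_by_parent : List (String × List (List (String × String)))) (top_cell target_cell : String) :
    ∀ (fuel : Nat) (cell : String) (path : List String) (active : PySem.Set String) (anc : List String)
      (results : List (String × List String)),
      (∀ x, x ∈ active ↔ x ∈ anc) →
      dfsA children_by_parent top_cell target_cell fuel cell path active results
        = results ++ walkB children_by_parent top_cell target_cell fuel cell path anc := by
  intro fuel
  induction fuel with
  | zero => intro cell path active anc results _; simp [dfsA, walkB]
  | succ f ih =>
    intro cell path active anc results H
    by_cases hmem : cell ∈ anc
    · have hact : cell ∈ active := (H cell).mpr hmem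
      simp [dfsA, walkB, hmem, hact]
    · have hact : cell ∉ active := fun h => hmem ((H cell).mp h)
      have h1 : PySem.Set.contains active cell = false := by simp [hact]
      have h2 : anc.contains cell = false := by simp [hmem]
      have Hadd : ∀ x, x ∈ PySem.Set.add active cell ↔ x ∈ anc ++ [cell] := by
        intro x
        rw [PySem.Set.mem_add]
        simp [H x, or_comm]
      simp only [dfsA, walkB, h1, h2, Bool.false_eq_true, if_false]
      generalize (PySem.Dict.getD (⟨children_by_parent⟩ : PySem.Dict String (List (List (String × String)))) cell []) = edges
      induction edges generalizing results with
      | nil => simp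
      | cons e es ihe =>
        simp only [List.foldl_cons, List.flatMap_cons]
        rw [ihe, ih _ _ _ _ _ Hadd]
        by_cases ht : (PySem.Dict.getD (⟨e⟩ : PySem.Dict String String) "child_cell" "" == target_cell) = true
        · simp [ht, List.append_assoc]
        · simp [ht, List.append_assoc]

-- ---- B-side machinery: denotation and step-count of the stack machine ----

-- Denotation of one frame (cell, path, remaining edges) whose ancestor chain is anc.
def denoteF (children_by_parent : List (String × List (List (String × String)))) (top_cell target_cell : String)
    (fd : Nat) (path : List String) (es : List (List (String × String))) (anc : List String) :
    List (String × List String) :=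
  es.flatMap (fun edge =>
    (if PySem.Dict.getD ⟨edge⟩ "child_cell" "" == target_cell then [(top_cell, path ++ [PySem.Dict.getD ⟨edge⟩ "inst_name" ""])] else []) ++
      walkB children_by_parent top_cell target_cell fd (PySem.Dict.getD ⟨edge⟩ "child_cell" "")
        (path ++ [PySem.Dict.getD ⟨edge⟩ "inst_name" ""]) anc)

-- Denotation of the whole stack (head = top frame, entered with depth fuel fd; deeper frames were
-- entered with larger depth fuel).
def denoteS (children_by_parent : List (String × List (List (String × String)))) (top_cell target_cell : String) :
    Nat → List (String × List String × List (List (String × String))) → List (String × List String)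
  | _, [] => []
  | fd, fr :: rest =>
      denoteF children_by_parent top_cell target_cell fd fr.2.1 fr.2.2 (((fr :: rest).map (·.1)).reverse) ++
        denoteS children_by_parent top_cell target_cell (fd+1) rest

-- Number of machine steps needed to fully process cell (mirrors walkB).
def costW (children_by_parent : List (String × List (List (String × String)))) :
    Nat → String → List String → Nat
  | 0, _, _ => 0
  | fd+1, cell, anc =>
    if anc.contains cell then 0
    else ((PySem.Dict.getD ⟨children_by_parent⟩ cell []).map
            (fun edge => 1 + costW children_by_parent fd (PySem.Dict.getD ⟨edge⟩ "child_cell" "") (anc ++ [cell]))).sum + 1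

def costF (children_by_parent : List (String × List (List (String × String)))) (fd : Nat)
    (es : List (List (String × String))) (anc : List String) : Nat :=
  (es.map (fun edge => 1 + costW children_by_parent fd (PySem.Dict.getD ⟨edge⟩ "child_cell" "") anc)).sum + 1

def costS (children_by_parent : List (String × List (List (String × String)))) :
    Nat → List (String × List String × List (List (String × String))) → Nat
  | _, [] => 0
  | fd, fr :: rest =>
      costF children_by_parent fd fr.2.2 (((fr :: rest).map (·.1)).reverse) +
        costS children_by_parent (fd+1) rest

-- Keys of the dict not yet on the ancestor chain.
def keysLeft (children_by_parent : List (String × List (List (String × String)))) (anc : List String) : Nat :=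
  ((PySem.List.dedup (children_by_parent.map Prod.fst)).filter (fun c => !anc.contains c)).length

-- Depth-fuel sufficiency for every frame of the stack.
def SuffS (children_by_parent : List (String × List (List (String × String)))) :
    Nat → List (String × List String × List (List (String × String))) → Prop
  | _, [] => True
  | fd, fr :: rest =>
      (fr.2.2 = [] ∨ keysLeft children_by_parent (((fr :: rest).map (·.1)).reverse) + 1 ≤ fd) ∧
        SuffS children_by_parent (fd+1) rest

lemma getD_mk_eq_nil_of_not_mem (children_by_parent : List (String × List (List (String × String))))
    (c : String) (h : c ∉ children_by_parent.map Prod.fst) :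
    PySem.Dict.getD (⟨children_by_parent⟩ : PySem.Dict String (List (List (String × String)))) c [] = [] := by
  induction children_by_parent with
  | nil => rfl
  | cons p rest ih =>
    simp only [List.map_cons, List.mem_cons, not_or] at h
    rw [PySem.Dict.getD_eq_get?_getD, PySem.Dict.get?_mk_cons]
    have hne : (p.1 == c) = false := beq_eq_false_iff_ne.mpr (fun e => h.1 e.symm)
    rw [hne]
    simp only [Bool.false_eq_true, if_false]
    rw [← PySem.Dict.getD_eq_get?_getD]
    exact ih h.2

lemma keysLeft_lt (children_by_parent : List (String × List (List (String × String))))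
    (anc : List String) (c : String) (hk : c ∈ children_by_parent.map Prod.fst) (hc : c ∉ anc) :
    keysLeft children_by_parent (anc ++ [c]) < keysLeft children_by_parent anc := by
  unfold keysLeft
  have hmem : c ∈ PySem.List.dedup (children_by_parent.map Prod.fst) := by
    simpa [PySem.List.mem_dedup] using hk
  have himp : ∀ a : String, (!(anc ++ [c]).contains a) = true → (!anc.contains a) = true := by
    intro a ha
    simp only [Bool.not_eq_true', List.contains_eq_mem, decide_eq_false_iff_not, List.mem_append,
      List.mem_singleton, not_or] at ha ⊢
    exact ha.1
  have hsub := List.monotone_filter_right (PySem.List.dedup (children_by_parent.map Prod.fst)) himp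
  have hc1 : c ∈ (PySem.List.dedup (children_by_parent.map Prod.fst)).filter (fun x => !anc.contains x) :=
    List.mem_filter.mpr ⟨hmem, by simpa using hc⟩
  have hc2 : c ∉ (PySem.List.dedup (children_by_parent.map Prod.fst)).filter (fun x => !(anc ++ [c]).contains x) := by
    simp [List.mem_filter]
  rcases Nat.lt_or_ge ((PySem.List.dedup (children_by_parent.map Prod.fst)).filter (fun x => !(anc ++ [c]).contains x)).length
      ((PySem.List.dedup (children_by_parent.map Prod.fst)).filter (fun x => !anc.contains x)).length with h | h
  · exact h
  · exact absurd (hsub.eq_of_length_le h ▸ hc1) hc2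

lemma costW_bound (children_by_parent : List (String × List (List (String × String))))
    (E : Nat) (hE : ∀ c : String, (PySem.Dict.getD (⟨children_by_parent⟩ : PySem.Dict String (List (List (String × String)))) c []).length ≤ E) :
    ∀ fd cell anc, costW children_by_parent fd cell anc + 1 ≤ (E + 2) ^ fd := by
  intro fd
  induction fd with
  | zero => intro cell anc; simp [costW]
  | succ f ih =>
    intro cell anc
    by_cases h : anc.contains cell = true
    · simp only [costW, h, if_true]
      exact Nat.one_le_pow _ _ (by omega)
    · rw [Bool.not_eq_true] at h
      simp only [costW, h, Bool.false_eq_true, if_false]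
      have hP : 1 ≤ (E + 2) ^ f := Nat.one_le_pow _ _ (by omega)
      have hsum : ((PySem.Dict.getD (⟨children_by_parent⟩ : PySem.Dict String (List (List (String × String)))) cell []).map
            (fun edge => 1 + costW children_by_parent f (PySem.Dict.getD ⟨edge⟩ "child_cell" "") (anc ++ [cell]))).sum
          ≤ (PySem.Dict.getD (⟨children_by_parent⟩ : PySem.Dict String (List (List (String × String)))) cell []).length * (E + 2) ^ f := by
        have := List.sum_le_card_nsmul
          ((PySem.Dict.getD (⟨children_by_parent⟩ : PySem.Dict String (List (List (String × String)))) cell []).map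
            (fun edge => 1 + costW children_by_parent f (PySem.Dict.getD ⟨edge⟩ "child_cell" "") (anc ++ [cell])))
          ((E + 2) ^ f)
          (by
            intro x hx
            obtain ⟨e, _, rfl⟩ := List.mem_map.mp hx
            have := ih (PySem.Dict.getD ⟨e⟩ "child_cell" "") (anc ++ [cell])
            omega)
        simpa [smul_eq_mul] using this
      have hmul : (PySem.Dict.getD (⟨children_by_parent⟩ : PySem.Dict String (List (List (String × String)))) cell []).length * (E + 2) ^ f
          ≤ E * (E + 2) ^ f := Nat.mul_le_mul_right _ (hE cell)
      have hfin : E * (E + 2) ^ f + 2 * (E + 2) ^ f = (E + 2) ^ (f + 1) := by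
        rw [pow_succ]; ring
      omega

lemma getD_mk_length_le (children_by_parent : List (String × List (List (String × String)))) (c : String) :
    (PySem.Dict.getD (⟨children_by_parent⟩ : PySem.Dict String (List (List (String × String)))) c []).length ≤
      (children_by_parent.map (fun p => p.2.length)).sum := by
  induction children_by_parent with
  | nil => simp [PySem.Dict.getD_eq_get?_getD, PySem.Dict.get?]
  | cons p rest ih =>
    rw [PySem.Dict.getD_eq_get?_getD, PySem.Dict.get?_mk_cons]
    by_cases h : (p.1 == c) = true
    · simp only [h, if_true, Option.getD_some, List.map_cons, List.sum_cons]
      omega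
    · rw [Bool.not_eq_true] at h
      rw [h]
      simp only [Bool.false_eq_true, if_false, List.map_cons, List.sum_cons]
      rw [← PySem.Dict.getD_eq_get?_getD]
      omega

-- walkB returns nothing on an already-active cell, at any depth fuel.
lemma walkB_of_mem (children_by_parent : List (String × List (List (String × String)))) (top_cell target_cell : String)
    (fd : Nat) (cell : String) (path anc : List String) (h : cell ∈ anc) :
    walkB children_by_parent top_cell target_cell fd cell path anc = [] := by
  cases fd with
  | zero => rfl
  | succ f =>
    have hc : anc.contains cell = true := by simpa using h
    simp only [walkB, hc, if_true]

lemma costW_of_mem (children_by_parent : List (String × List (List (String × String))))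
    (fd : Nat) (cell : String) (anc : List String) (h : cell ∈ anc) :
    costW children_by_parent fd cell anc = 0 := by
  cases fd with
  | zero => rfl
  | succ f =>
    have hc : anc.contains cell = true := by simpa using h
    simp only [costW, hc, if_true]

-- The machine computes 'results ++ denotation of the stack' whenever the active set is exactly
-- the (distinct) cells of the stack, the per-frame depth fuels suffice, and the step fuel covers
-- the step count.
lemma runB_eq (children_by_parent : List (String × List (List (String × String)))) (top_cell target_cell : String) :
    ∀ (fuel : Nat) (stack : List (String × List String × List (List (String × String))))
      (active : PySem.Set String) (results : List (String × List String)) (fd : Nat),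
      (∀ x, x ∈ active ↔ x ∈ stack.map (·.1)) →
      (stack.map (·.1)).Nodup →
      SuffS children_by_parent fd stack →
      costS children_by_parent fd stack ≤ fuel →
      runB children_by_parent top_cell target_cell fuel stack active results
        = results ++ denoteS children_by_parent top_cell target_cell fd stack := by
  intro fuel
  induction fuel with
  | zero =>
    intro stack active results fd _ _ _ hcost
    cases stack with
    | nil => simp [runB, denoteS]
    | cons fr rest =>
      exfalso
      obtain ⟨c, p, es⟩ := fr
      simp only [costS, costF] at hcost
      omega
  | succ f ih =>
    intro stack active results fd Hmem Hnd Hsuff Hcost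
    match stack with
    | [] => simp [runB, denoteS]
    | (c, p, []) :: rest =>
      have hnd' := Hnd
      simp only [List.map_cons, List.nodup_cons] at hnd'
      rw [runB, ih rest _ results (fd + 1) ?_ hnd'.2 Hsuff.2 ?_]
      · simp [denoteS, denoteF]
      · intro x
        rw [PySem.Set.mem_discard]
        have hx := Hmem x
        simp only [List.map_cons, List.mem_cons] at hx
        constructor
        · rintro ⟨hxa, hxc⟩
          rcases hx.mp hxa with h | h
          · exact absurd h hxc
          · exact h
        · intro hxr
          refine ⟨hx.mpr (Or.inr hxr), ?_⟩
          rintro rfl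
          exact hnd'.1 hxr
      · simp only [costS, costF, List.map_nil, List.sum_nil] at Hcost ⊢
        omega
    | (c, p, e :: es) :: rest =>
      have hsuffh := Hsuff.1
      have hsufft := Hsuff.2
      have hkey : keysLeft children_by_parent (((c :: rest.map (·.1)) : List String).reverse) + 1 ≤ fd := by
        rcases hsuffh with h | h
        · exact absurd h (by simp)
        · simpa using h
      by_cases hch : PySem.Set.contains active (PySem.Dict.getD ⟨e⟩ "child_cell" "") = true
      · -- child already active: consume the edge, stay on the same frame
        have hchanc : (PySem.Dict.getD ⟨e⟩ "child_cell" "") ∈ ((c :: rest.map (·.1)) : List String).reverse := by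
          rw [List.mem_reverse]
          have := (Hmem _).mp (by simpa using hch)
          simpa using this
        rw [runB]
        simp only [hch, if_true]
        rw [ih ((c, p, es) :: rest) active _ fd (by simpa using Hmem) (by simpa using Hnd)
            ⟨Or.inr (by simpa using hkey), hsufft⟩ ?_]
        · simp only [denoteS, denoteF, List.flatMap_cons, List.map_cons]
          rw [walkB_of_mem _ _ _ _ _ _ _ hchanc]
          by_cases ht : (PySem.Dict.getD ⟨e⟩ "child_cell" "" == target_cell) = true
          · simp [ht]
          · simp [ht]
        · have hcw := costW_of_mem children_by_parent fd (PySem.Dict.getD ⟨e⟩ "child_cell" "")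
            (((c :: rest.map (·.1)) : List String).reverse) hchanc
          simp only [costS, costF, List.map_cons, List.sum_cons] at Hcost ⊢
          omega
      · -- child not active: consume the edge and push the child's frame
        have hchnot : (PySem.Dict.getD ⟨e⟩ "child_cell" "") ∉ ((c :: rest.map (·.1)) : List String) := by
          intro hmem
          exact hch (by simp only [PySem.Set.contains_iff]; exact (Hmem _).mpr (by simpa using hmem))
        have hchanc : (PySem.Dict.getD ⟨e⟩ "child_cell" "") ∉ ((c :: rest.map (·.1)) : List String).reverse :=
          fun hmem => hchnot (List.mem_reverse.mp hmem)
        obtain ⟨g, rfl⟩ : ∃ g, fd = g + 1 := ⟨fd - 1, by omega⟩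
        have hkg : keysLeft children_by_parent (((c :: rest.map (·.1)) : List String).reverse) ≤ g := by omega
        rw [runB]
        simp only [hch, Bool.false_eq_true, if_false]
        have hanc' : (((PySem.Dict.getD ⟨e⟩ "child_cell" "") :: c :: rest.map (·.1)) : List String).reverse
            = ((c :: rest.map (·.1)) : List String).reverse ++ [PySem.Dict.getD ⟨e⟩ "child_cell" ""] := by
          simp
        rw [ih ((PySem.Dict.getD ⟨e⟩ "child_cell" "", p ++ [PySem.Dict.getD ⟨e⟩ "inst_name" ""],
              PySem.Dict.getD ⟨children_by_parent⟩ (PySem.Dict.getD ⟨e⟩ "child_cell" "") []) :: (c, p, es) :: rest)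
            _ _ g ?_ ?_ ?_ ?_]
        · -- denotation bookkeeping
          simp only [denoteS, denoteF, List.flatMap_cons, List.map_cons]
          rw [hanc']
          have hwalk : walkB children_by_parent top_cell target_cell (g + 1) (PySem.Dict.getD ⟨e⟩ "child_cell" "")
              (p ++ [PySem.Dict.getD ⟨e⟩ "inst_name" ""]) (((c :: rest.map (·.1)) : List String).reverse)
              = (PySem.Dict.getD ⟨children_by_parent⟩ (PySem.Dict.getD ⟨e⟩ "child_cell" "") []).flatMap
                  (fun edge =>
                    (if PySem.Dict.getD ⟨edge⟩ "child_cell" "" == target_cell then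
                        [(top_cell, (p ++ [PySem.Dict.getD ⟨e⟩ "inst_name" ""]) ++ [PySem.Dict.getD ⟨edge⟩ "inst_name" ""])] else []) ++
                      walkB children_by_parent top_cell target_cell g (PySem.Dict.getD ⟨edge⟩ "child_cell" "")
                        ((p ++ [PySem.Dict.getD ⟨e⟩ "inst_name" ""]) ++ [PySem.Dict.getD ⟨edge⟩ "inst_name" ""])
                        (((c :: rest.map (·.1)) : List String).reverse ++ [PySem.Dict.getD ⟨e⟩ "child_cell" ""])) := by
            have hcont : (((c :: rest.map (·.1)) : List String).reverse).contains (PySem.Dict.getD ⟨e⟩ "child_cell" "") = false := by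
              simpa using hchanc
            simp only [walkB, hcont, Bool.false_eq_true, if_false]
          rw [hwalk]
          by_cases ht : (PySem.Dict.getD ⟨e⟩ "child_cell" "" == target_cell) = true
          · simp [ht, List.append_assoc]
          · simp [ht, List.append_assoc]
        · -- membership invariant
          intro x
          rw [PySem.Set.mem_add]
          have hx := Hmem x
          simp only [List.map_cons, List.mem_cons] at hx ⊢
          tauto
        · -- nodup
          have Hnd' : ((c :: rest.map (·.1)) : List String).Nodup := by simpa using Hnd
          simp only [List.map_cons]
          exact List.nodup_cons.mpr ⟨hchnot, Hnd'⟩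
        · -- depth-fuel sufficiency
          refine ⟨?_, Or.inr (by simpa using hkg), hsufft⟩
          by_cases hk : (PySem.Dict.getD ⟨e⟩ "child_cell" "") ∈ children_by_parent.map Prod.fst
          · right
            have := keysLeft_lt children_by_parent (((c :: rest.map (·.1)) : List String).reverse)
              (PySem.Dict.getD ⟨e⟩ "child_cell" "") hk hchanc
            simp only [List.map_cons]
            rw [hanc'] at *
            omega
          · left
            exact getD_mk_eq_nil_of_not_mem children_by_parent _ hk
        · -- step-fuel accounting
          have hcw : costW children_by_parent (g + 1) (PySem.Dict.getD ⟨e⟩ "child_cell" "")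
              (((c :: rest.map (·.1)) : List String).reverse)
              = ((PySem.Dict.getD ⟨children_by_parent⟩ (PySem.Dict.getD ⟨e⟩ "child_cell" "") []).map
                  (fun edge => 1 + costW children_by_parent g (PySem.Dict.getD ⟨edge⟩ "child_cell" "")
                    (((c :: rest.map (·.1)) : List String).reverse ++ [PySem.Dict.getD ⟨e⟩ "child_cell" ""]))).sum + 1 := by
            have hcont : (((c :: rest.map (·.1)) : List String).reverse).contains (PySem.Dict.getD ⟨e⟩ "child_cell" "") = false := by
              simpa using hchanc
            simp only [costW, hcont, Bool.false_eq_true, if_false]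
          simp only [costS, costF, List.map_cons, List.sum_cons] at Hcost ⊢
          rw [hanc']
          omega

-- ===== VERDICT (by name: the statement is the Claim_ definition above) =====
theorem find_matches_under_top_spec : Claim_equal_find_matches_under_top := by
  intro cbp top tgt _ _
  unfold Spec_find_matches_under_top find_matches_under_top
  have halt : find_matches_under_top_alt cbp top tgt
      = runB cbp top tgt (((cbp.map (fun p => p.2.length)).sum + 2) ^ (cbp.length + 2))
          [(top, [], PySem.Dict.getD ⟨cbp⟩ top [])] (PySem.Set.add PySem.Set.empty top) [] := rfl
  have hmem0 : ∀ x : String, x ∈ PySem.Set.add PySem.Set.empty top ↔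
      x ∈ ([(top, ([] : List String), PySem.Dict.getD ⟨cbp⟩ top [])].map (·.1)) := by
    intro x; rw [PySem.Set.mem_add]; simp [PySem.Set.empty]
  have hnd0 : (([(top, ([] : List String), PySem.Dict.getD ⟨cbp⟩ top [])]).map (·.1)).Nodup := by simp
  have hkl : keysLeft cbp [top] ≤ cbp.length := by
    unfold keysLeft
    calc ((PySem.List.dedup (cbp.map Prod.fst)).filter (fun c => !([top] : List String).contains c)).length
        ≤ (PySem.List.dedup (cbp.map Prod.fst)).length := List.length_filter_le _ _
      _ ≤ (cbp.map Prod.fst).length := by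
          rw [PySem.List.dedup_eq_ofList]; exact PySem.Set.length_ofList_le _
      _ = cbp.length := by simp
  have hsuff0 : SuffS cbp (cbp.length + 1) [(top, [], PySem.Dict.getD ⟨cbp⟩ top [])] := by
    refine ⟨Or.inr ?_, trivial⟩
    simp only [List.map_cons, List.map_nil, List.reverse_cons, List.reverse_nil, List.nil_append]
    omega
  have hcost0 : costS cbp (cbp.length + 1) [(top, [], PySem.Dict.getD ⟨cbp⟩ top [])]
      ≤ ((cbp.map (fun p => p.2.length)).sum + 2) ^ (cbp.length + 2) := by
    have hb := costW_bound cbp ((cbp.map (fun p => p.2.length)).sum)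
      (fun c => getD_mk_length_le cbp c) (cbp.length + 2) top []
    have heq : costW cbp (cbp.length + 2) top []
        = costS cbp (cbp.length + 1) [(top, [], PySem.Dict.getD ⟨cbp⟩ top [])] := by
      simp [costW, costS, costF]
    omega
  rw [dfsA_eq_walkB cbp top tgt (cbp.length + 2) top [] PySem.Set.empty [] []
      (by intro x; simp [PySem.Set.empty]),
    halt, runB_eq cbp top tgt _ _ _ _ (cbp.length + 1) hmem0 hnd0 hsuff0 hcost0]
  simp [walkB, denoteS, denoteF]
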